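-- pv_equiv track=rewrite | github.com/seungkeolkim/data-model-management-platform | backend/lib/manipulators/cls_merge_classes.py | _build_merged_classes
-- ===== SOURCE A (Python) =====
-- def _build_merged_classes(
--     original_classes: list[str],
--     source_class_set: set[str],
--     target_class: str,
-- ) -> list[str]:
--     """source_classes 를 제거하고 첫 번째 source 위치에 target_class 를 삽입한 classes 배열 반환."""
--     result: list[str] = []
--     target_inserted = False
--     for cls_name in original_classes:
--         if cls_name in source_class_set:
--             if not target_inserted:
--                 result.append(target_class)
--                 target_inserted = True
--             # source_class_set 에 속하는 나머지 class 는 건너뜀.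
--         else:
--             result.append(cls_name)
--     return result
-- ===== SOURCE B (Python) =====
-- def _build_merged_classes(
--     original_classes: list[str],
--     source_class_set: set[str],
--     target_class: str,
-- ) -> list[str]:
--     result = [c for c in original_classes if c not in source_class_set]
--     first = next((i for i, c in enumerate(original_classes) if c in source_class_set), None)
--     if first is not None:
--         result.insert(first, target_class)
--     return result
-- ===== Notes on version B (the rewrite author's own statement) =====
-- stated objective: idiomatic
-- what changed: Replaces the interleaved loop with a target_inserted flag by a filter comprehension plus a separate first-source-index find and a single insert.
import Mathlib
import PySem

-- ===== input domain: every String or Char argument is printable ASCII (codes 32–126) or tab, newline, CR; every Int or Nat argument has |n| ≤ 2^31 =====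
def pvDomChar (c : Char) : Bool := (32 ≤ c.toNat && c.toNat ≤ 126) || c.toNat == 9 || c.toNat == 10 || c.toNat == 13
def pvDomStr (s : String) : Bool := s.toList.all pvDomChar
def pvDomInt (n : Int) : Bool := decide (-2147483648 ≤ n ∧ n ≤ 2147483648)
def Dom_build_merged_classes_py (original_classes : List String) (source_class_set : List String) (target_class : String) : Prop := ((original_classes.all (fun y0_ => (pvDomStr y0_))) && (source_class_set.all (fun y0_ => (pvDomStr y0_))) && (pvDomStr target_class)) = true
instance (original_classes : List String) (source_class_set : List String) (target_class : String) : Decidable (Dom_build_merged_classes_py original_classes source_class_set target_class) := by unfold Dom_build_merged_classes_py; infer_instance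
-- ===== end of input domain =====

-- B replaces A's single loop with an inserted-flag by a filter pass plus a separate
-- first-source-index find and one insert (idiomatic decomposition; same cost).

-- ===== PORT A =====
-- A's for-loop over original_classes, carrying (result, target_inserted).
def pvLoopA (src : List String) (tgt : String) : List String → List String → Bool → List String
  | [], result, _ => result
  | c :: rest, result, inserted =>
    if src.contains c then
      if !inserted then pvLoopA src tgt rest (result ++ [tgt]) true
      else pvLoopA src tgt rest result inserted
    else pvLoopA src tgt rest (result ++ [c]) inserted

def build_merged_classes_py (original_classes : List String) (source_class_set : List String) (target_class : String) : List String :=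
  pvLoopA source_class_set target_class original_classes [] false

-- ===== PORT B =====
def build_merged_classes_py_alt (original_classes : List String) (source_class_set : List String) (target_class : String) : List String :=
  let result := original_classes.filter (fun c => !(source_class_set.contains c))
  match original_classes.findIdx? (fun c => source_class_set.contains c) with
  | none => result
  | some first => result.insertIdx first target_class

-- ===== PRECONDITION & SPEC =====
def Spec_build_merged_classes_py (original_classes : List String) (source_class_set : List String) (target_class : String) (out : List String) : Prop := out = build_merged_classes_py_alt original_classes source_class_set target_class
instance (original_classes : List String) (source_class_set : List String) (target_class : String) (out : List String) : Decidable (Spec_build_merged_classes_py original_classes source_class_set target_class out) := by unfold Spec_build_merged_classes_py; infer_instance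

-- ===== CLAIM (what is proved, stated in full; the proofs are below) =====
def Claim_equal_build_merged_classes_py : Prop := ∀ (original_classes : List String) (source_class_set : List String) (target_class : String), Dom_build_merged_classes_py original_classes source_class_set target_class → Spec_build_merged_classes_py original_classes source_class_set target_class (build_merged_classes_py original_classes source_class_set target_class)

-- ===== LEMMAS AND PROOFS =====
-- Once the flag is true, the rest of A's loop is just a filter.
theorem pvLoopA_true (src : List String) (tgt : String) :
    ∀ (l res : List String),
      pvLoopA src tgt l res true = res ++ l.filter (fun c => !(src.contains c)) := by
  intro l
  induction l with
  | nil => intro res; simp [pvLoopA]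
  | cons c rest ih =>
    intro res
    by_cases h : c ∈ src <;> simp [pvLoopA, List.filter_cons, h, ih]

-- With the flag still false, A's loop equals B's filter-and-insert.
theorem pvLoopA_false (src : List String) (tgt : String) :
    ∀ (l res : List String),
      pvLoopA src tgt l res false = res ++
        (match l.findIdx? (fun c => src.contains c) with
         | none => l.filter (fun c => !(src.contains c))
         | some first => (l.filter (fun c => !(src.contains c))).insertIdx first tgt) := by
  intro l
  induction l with
  | nil => intro res; simp [pvLoopA, List.findIdx?_nil]
  | cons c rest ih =>
    intro res
    by_cases h : c ∈ src
    · simp [pvLoopA, h, List.findIdx?_cons, List.filter_cons, pvLoopA_true,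
        List.insertIdx]
    · rw [show pvLoopA src tgt (c :: rest) res false
          = pvLoopA src tgt rest (res ++ [c]) false by
            simp [pvLoopA, h], ih]
      simp only [List.findIdx?_cons, List.filter_cons, h, decide_eq_true_eq,
        List.contains_eq_mem, if_neg, decide_false, Bool.not_false, if_true]
      cases hf : rest.findIdx? (fun x => decide (x ∈ src)) with
      | none => simp
      | some i => simp [List.insertIdx_succ_cons]

-- ===== VERDICT (by name: the statement is the Claim_ definition above) =====
theorem build_merged_classes_py_spec : Claim_equal_build_merged_classes_py := by
  intro orig src tgt _
  unfold Spec_build_merged_classes_py build_merged_classes_py build_merged_classes_py_alt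
  rw [pvLoopA_false]
  simp
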